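-- pv_equiv track=rewrite | github.com/PearuUu/CKE_Zbor_Zadan_zadanie_praktyczne | 62.py | Z4
-- ===== SOURCE A (Python) =====
-- def Z4(liczby):
--     in_decimal = 0
--     in_octal = 0
--     for num in liczby:
--         for digit in str(num):
--             if digit == '6':
--                 in_decimal += 1
--         for digit in str(oct(num)):
--             if digit == '6':
--                 in_octal += 1
--     return in_decimal, in_octal
-- ===== SOURCE B (Python) =====
-- def Z4(liczby):
--     in_decimal = 0
--     in_octal = 0
--     for num in liczby:
--         n = abs(num)
--         while n > 0:
--             n, d = divmod(n, 10)
--             if d == 6: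
--                 in_decimal += 1
--         n = abs(num)
--         while n > 0:
--             n, d = divmod(n, 8)
--             if d == 6:
--                 in_octal += 1
--     return in_decimal, in_octal
-- ===== Notes on version B (the rewrite author's own statement) =====
-- stated objective: alternative
-- what changed: B extracts digits arithmetically with divmod on abs(num) in bases 10 and 8 instead of building str(num) and oct(num) and scanning their characters.
import Mathlib
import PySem

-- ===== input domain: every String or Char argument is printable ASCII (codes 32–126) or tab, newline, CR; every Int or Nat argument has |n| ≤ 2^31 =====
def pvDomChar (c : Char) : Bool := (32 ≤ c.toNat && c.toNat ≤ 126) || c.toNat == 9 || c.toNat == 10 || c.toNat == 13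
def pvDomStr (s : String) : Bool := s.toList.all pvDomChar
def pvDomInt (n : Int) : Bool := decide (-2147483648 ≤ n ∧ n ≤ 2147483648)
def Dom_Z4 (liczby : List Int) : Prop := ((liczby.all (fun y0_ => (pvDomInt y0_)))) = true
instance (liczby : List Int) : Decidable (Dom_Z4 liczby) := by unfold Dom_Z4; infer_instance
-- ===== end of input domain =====

-- B counts digit 6 by arithmetic divmod extraction instead of scanning str/oct strings (alternative decomposition, same cost).

-- ===== PORT A =====
-- oct(num): "0o" + octal digits of |num|, '-' in front for negatives (exact port of the builtin)
def pyOctChars (n : Int) : List Char :=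
  if n < 0 then '-' :: '0' :: 'o' :: Nat.toDigits 8 n.natAbs
  else '0' :: 'o' :: Nat.toDigits 8 n.toNat

def Z4 (liczby : List Int) : Int × Int :=
  liczby.foldl (fun (st : Int × Int) num =>
    let d := (PySem.Int.toChars num).foldl
      (fun acc digit => if digit == '6' then acc + 1 else acc) st.1
    let o := (pyOctChars num).foldl
      (fun acc digit => if digit == '6' then acc + 1 else acc) st.2
    (d, o)) (0, 0)

-- ===== PORT B =====
-- the 'while n > 0: n, d = divmod(n, b); if d == 6: cnt += 1' loop of Source B
def count6 (b : Nat) (hb : 2 ≤ b) (n : Nat) : Int :=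
  if h : n = 0 then 0
  else (if n % b = 6 then 1 else 0) + count6 b hb (n / b)
decreasing_by exact Nat.div_lt_self (Nat.pos_of_ne_zero h) hb

def Z4_alt (liczby : List Int) : Int × Int :=
  liczby.foldl (fun (st : Int × Int) num =>
    (st.1 + count6 10 (by norm_num) num.natAbs,
     st.2 + count6 8 (by norm_num) num.natAbs)) (0, 0)

-- ===== PRECONDITION & SPEC =====
def Spec_Z4 (liczby : List Int) (out : Int × Int) : Prop := out = Z4_alt liczby
instance (liczby : List Int) (out : Int × Int) : Decidable (Spec_Z4 liczby out) := by unfold Spec_Z4; infer_instance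

-- ===== CLAIM (what is proved, stated in full; the proofs are below) =====
def Claim_equal_Z4 : Prop := ∀ (liczby : List Int), Dom_Z4 liczby → Spec_Z4 liczby (Z4 liczby)

-- ===== LEMMAS AND PROOFS =====

theorem digitChar_eq_six_iff (d : Nat) (hd : d < 10) : (Nat.digitChar d = '6') ↔ d = 6 := by
  interval_cases d <;> simp [Nat.digitChar]

theorem count_toDigitsCore (b : Nat) (hb : 2 ≤ b) (hb10 : b ≤ 10) :
    ∀ fuel n ds, n < fuel →
      ((Nat.toDigitsCore b fuel n ds).count '6' : Int)
        = count6 b hb n + (ds.count '6' : Int) := by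
  intro fuel
  induction fuel with
  | zero => intro n ds h; omega
  | succ fuel ih =>
    intro n ds h
    rw [Nat.toDigitsCore]
    have hdig : (Nat.digitChar (n % b) = '6') ↔ n % b = 6 :=
      digitChar_eq_six_iff _ (lt_of_lt_of_le (Nat.mod_lt _ (by omega)) hb10)
    by_cases hz : n / b = 0
    · simp only [hz, if_true]
      rcases Nat.eq_zero_or_pos n with h0 | h0
      · subst h0
        rw [count6]
        simp [Nat.digitChar]
      · rw [count6, dif_neg (by omega), hz, count6, dif_pos rfl]
        rw [List.count_cons]
        by_cases h6 : n % b = 6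
        · simp [h6, show Nat.digitChar 6 = '6' from by decide]
          ring
        · have : ¬ (Nat.digitChar (n % b) == '6') = true := by
            simp [hdig]; exact h6
          simp [h6, this]
    · rw [if_neg hz]
      have hn0 : n ≠ 0 := by intro h0; subst h0; simp at hz
      have hlt : n / b < fuel := by
        have := Nat.div_lt_self (Nat.pos_of_ne_zero hn0) hb
        omega
      rw [count6, dif_neg hn0, ih (n / b) _ hlt]
      rw [List.count_cons]
      by_cases h6 : n % b = 6
      · simp [h6, show Nat.digitChar 6 = '6' from by decide]
        ring
      · have : ¬ (Nat.digitChar (n % b) == '6') = true := by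
          simp [hdig]; exact h6
        simp [this, h6]

theorem count_toDigits (b : Nat) (hb : 2 ≤ b) (hb10 : b ≤ 10) (n : Nat) :
    ((Nat.toDigits b n).count '6' : Int) = count6 b hb n := by
  have := count_toDigitsCore b hb hb10 (n + 1) n [] (Nat.lt_succ_self n)
  simpa [Nat.toDigits] using this

theorem count_toChars (num : Int) :
    ((PySem.Int.toChars num).count '6' : Int) = count6 10 (by norm_num) num.natAbs := by
  unfold PySem.Int.toChars
  by_cases h : num < 0
  · rw [if_pos h, List.count_cons]
    simpa using count_toDigits 10 (by norm_num) (by norm_num) num.natAbs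
  · rw [if_neg h]
    have : num.toNat = num.natAbs := by omega
    rw [this]
    exact count_toDigits 10 (by norm_num) (by norm_num) num.natAbs

theorem count_pyOctChars (num : Int) :
    ((pyOctChars num).count '6' : Int) = count6 8 (by norm_num) num.natAbs := by
  unfold pyOctChars
  by_cases h : num < 0
  · rw [if_pos h]
    simp only [List.count_cons]
    simpa using count_toDigits 8 (by norm_num) (by norm_num) num.natAbs
  · rw [if_neg h]
    have : num.toNat = num.natAbs := by omega
    rw [this]
    simp only [List.count_cons]
    simpa using count_toDigits 8 (by norm_num) (by norm_num) num.natAbs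

theorem foldl_step_eq (liczby : List Int) : ∀ st : Int × Int,
    liczby.foldl (fun (st : Int × Int) num =>
      let d := (PySem.Int.toChars num).foldl
        (fun acc digit => if digit == '6' then acc + 1 else acc) st.1
      let o := (pyOctChars num).foldl
        (fun acc digit => if digit == '6' then acc + 1 else acc) st.2
      (d, o)) st
    = liczby.foldl (fun (st : Int × Int) num =>
      (st.1 + count6 10 (by norm_num) num.natAbs,
       st.2 + count6 8 (by norm_num) num.natAbs)) st := by
  induction liczby with
  | nil => intro st; rfl
  | cons x xs ih =>
    intro st
    simp only [List.foldl_cons]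
    rw [PySem.List.foldl_beq_add_one, PySem.List.foldl_beq_add_one,
      count_toChars, count_pyOctChars]
    exact ih _

-- ===== VERDICT (by name: the statement is the Claim_ definition above) =====
theorem Z4_spec : Claim_equal_Z4 := by
  intro liczby _
  unfold Spec_Z4 Z4 Z4_alt
  exact foldl_step_eq liczby (0, 0)
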